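-- pv_equiv track=rewrite | github.com/Lippeck/FuckingAroundAndFindingOut | 39_Room Planner/level2.py | place_desks
-- ===== SOURCE A (Python) =====
-- def place_desks(x, y, z):
--     matrix = [['.' for _ in range(x)] for _ in range(y)]
--     desk_count = 0
--     for i in range(y):
--         for j in range(0, x - 2, 3):
--             if desk_count < z:
--                 desk_count += 1
--                 desk_str = str(desk_count)
--                 matrix[i][j] = desk_str
--                 matrix[i][j + 1] = desk_str
--                 matrix[i][j + 2] = desk_str
--     return matrix
-- ===== SOURCE B (Python) =====
-- def place_desks(x, y, z):
--     t = len(range(0, x - 2, 3))  # desk slots per row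
--     rows = []
--     for i in range(y):
--         hi = min(z, (i + 1) * t)
--         cells = []
--         for k in range(i * t + 1, hi + 1):
--             cells += [str(k)] * 3
--         cells += ['.'] * (x - len(cells))
--         rows.append(cells)
--     return rows
-- ===== Notes on version B (the rewrite author's own statement) =====
-- stated objective: simpler
-- what changed: B builds each row directly (desk numbers for row i computed arithmetically from the per-row slot capacity t, then '.'-padding), instead of allocating a dot matrix and mutating it cell-triple by cell-triple with a running desk counter.
import Mathlib
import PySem

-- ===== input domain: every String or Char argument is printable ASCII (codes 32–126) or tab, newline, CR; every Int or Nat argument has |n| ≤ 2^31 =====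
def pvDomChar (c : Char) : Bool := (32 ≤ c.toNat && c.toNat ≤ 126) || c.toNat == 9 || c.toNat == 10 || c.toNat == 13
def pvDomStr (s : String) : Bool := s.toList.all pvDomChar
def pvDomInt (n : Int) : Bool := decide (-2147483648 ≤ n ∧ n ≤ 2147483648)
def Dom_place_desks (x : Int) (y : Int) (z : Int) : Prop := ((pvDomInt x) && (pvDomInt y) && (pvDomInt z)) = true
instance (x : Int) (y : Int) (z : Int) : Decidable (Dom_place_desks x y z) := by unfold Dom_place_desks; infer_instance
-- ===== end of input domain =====

-- B builds each row directly (desk numbers computed arithmetically from the per-row slot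
-- capacity) instead of mutating a dot matrix with a running counter; objective: simpler.

-- ===== PORT A =====
-- matrix[i][j] = v  (i, j are the in-range non-negative indices produced by range())
def pdSet2 (m : List (List String)) (i j : Nat) (v : String) : List (List String) :=
  m.modify i (fun row => row.set j v)

def place_desks (x : Int) (y : Int) (z : Int) : List (List String) :=
  let matrix : List (List String) :=
    (PySem.List.pyRange 0 y 1).map (fun _ => (PySem.List.pyRange 0 x 1).map (fun _ => "."))
  ((PySem.List.pyRange 0 y 1).foldl
    (fun (st : List (List String) × Int) i =>
      (PySem.List.pyRange 0 (x - 2) 3).foldl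
        (fun (st : List (List String) × Int) j =>
          if st.2 < z then
            let ds := PySem.Int.toStr (st.2 + 1)
            (pdSet2 (pdSet2 (pdSet2 st.1 i.toNat j.toNat ds) i.toNat (j + 1).toNat ds)
              i.toNat (j + 2).toNat ds, st.2 + 1)
          else st)
        st)
    (matrix, 0)).1

-- ===== PORT B =====
def place_desks_alt (x : Int) (y : Int) (z : Int) : List (List String) :=
  let t : Int := ((PySem.List.pyRange 0 (x - 2) 3).length : Int)
  (PySem.List.pyRange 0 y 1).map (fun i =>
    let hi := min z ((i + 1) * t)
    let cells := (PySem.List.pyRange (i * t + 1) (hi + 1) 1).foldl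
      (fun acc k => acc ++ PySem.List.pyRepeat [PySem.Int.toStr k] 3) []
    cells ++ PySem.List.pyRepeat ["."] (x - (cells.length : Int)))

-- ===== PRECONDITION & SPEC =====
def Spec_place_desks (x : Int) (y : Int) (z : Int) (out : List (List String)) : Prop := out = place_desks_alt x y z
instance (x : Int) (y : Int) (z : Int) (out : List (List String)) : Decidable (Spec_place_desks x y z out) := by unfold Spec_place_desks; infer_instance

-- ===== CLAIM (what is proved, stated in full; the proofs are below) =====
def Claim_equal_place_desks : Prop := ∀ (x : Int) (y : Int) (z : Int), Dom_place_desks x y z → Spec_place_desks x y z (place_desks x y z)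

-- ===== LEMMAS AND PROOFS =====

-- range(b) as a mapped Nat range
lemma pyR1 (b : Int) : PySem.List.pyRange 0 b 1 = (List.range b.toNat).map (fun (k : Nat) => (k : Int)) := by
  rw [PySem.List.pyRange_of_pos 0 b (by norm_num)]
  have hc : (if (0:Int) < b then ((b - 0 + 1 - 1)/1).toNat else 0) = b.toNat := by
    simp only [Int.ediv_one]; split_ifs <;> omega
  rw [hc]
  exact List.map_congr_left (fun a _ => by ring)


-- slots per row
def Tn (x : Int) : Nat := (PySem.List.pyRange 0 (x - 2) 3).length

lemma hJ (x : Int) :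
    PySem.List.pyRange 0 (x - 2) 3 = (List.range (Tn x)).map (fun (k : Nat) => (3 * (k : Int))) := by
  unfold Tn
  rw [PySem.List.pyRange_of_pos 0 (x - 2) (by norm_num)]
  simp only [List.length_map, List.length_range]
  exact List.map_congr_left (fun a _ => by ring)

lemma hT3 (x : Int) : 3 * (Tn x : Int) ≤ max x 0 := by
  unfold Tn
  rw [PySem.List.pyRange_of_pos 0 (x - 2) (by norm_num)]
  simp only [List.length_map, List.length_range]
  split_ifs with h
  · have h1 := Int.mul_ediv_add_emod (x - 2 + 3 - 1) 3
    have h2 := Int.emod_nonneg (x - 2 + 3 - 1) (by norm_num : (3:Int) ≠ 0)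
    have h3 := Int.emod_lt_of_pos (x - 2 + 3 - 1) (by norm_num : (0:Int) < 3)
    omega
  · simp

-- one inner-loop step of A, seen at the level of the current row
def rowStep (z : Int) (st : List String × Int) (j : Int) : List String × Int :=
  if st.2 < z then
    (((st.1.set j.toNat (PySem.Int.toStr (st.2 + 1))).set (j + 1).toNat
        (PySem.Int.toStr (st.2 + 1))).set (j + 2).toNat (PySem.Int.toStr (st.2 + 1)), st.2 + 1)
  else st

lemma pdSet2_eq (m : List (List String)) (i j : Nat) (v : String) (h : i < m.length) :
    pdSet2 m i j v = m.set i (m[i].set j v) := by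
  unfold pdSet2
  simpa using List.modify_eq_set_get (fun row => row.set j v) h

lemma pdSet3 (m : List (List String)) (i a b c : Nat) (v : String) (h : i < m.length) :
    pdSet2 (pdSet2 (pdSet2 m i a v) i b v) i c v
      = m.set i (((m[i].set a v).set b v).set c v) := by
  rw [pdSet2_eq m i a v h]
  rw [pdSet2_eq (m.set i (m[i].set a v)) i b v (by simpa using h)]
  rw [List.getElem_set_self, List.set_set]
  rw [pdSet2_eq _ i c v (by simpa using h)]
  rw [List.getElem_set_self, List.set_set]

-- A's inner loop over row i only rewrites row i: it is rowStep folded over that row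
lemma lift (z : Int) (i : Nat) (js : List Int) :
    ∀ (m : List (List String)) (c : Int) (h : i < m.length),
    js.foldl (fun st j => if st.2 < z then
        (pdSet2 (pdSet2 (pdSet2 st.1 i j.toNat (PySem.Int.toStr (st.2 + 1))) i (j + 1).toNat
          (PySem.Int.toStr (st.2 + 1))) i (j + 2).toNat (PySem.Int.toStr (st.2 + 1)), st.2 + 1)
      else st) (m, c)
    = (m.set i (js.foldl (rowStep z) (m[i], c)).1, (js.foldl (rowStep z) (m[i], c)).2) := by
  induction js with
  | nil => intro m c h; simp [List.set_getElem_self h]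
  | cons j js ih =>
    intro m c h
    simp only [List.foldl_cons, rowStep]
    by_cases hlt : c < z
    · simp only [hlt, if_pos]
      rw [pdSet3 m i _ _ _ _ h]
      rw [ih _ _ (by simpa using h)]
      simp only [List.getElem_set_self, List.set_set]
    · simp only [hlt, ite_false]
      exact ih m c h

-- the desk-number block a full row writes, starting at counter c
def block (c : Int) (d : Nat) : List String :=
  (List.range d).flatMap (fun (s : Nat) => List.replicate 3 (PySem.Int.toStr (c + (s : Int) + 1)))

lemma flatMap_rep3_len (d : Nat) (f : Nat → String) :
    ((List.range d).flatMap (fun s => List.replicate 3 (f s))).length = 3 * d := by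
  induction d with
  | zero => simp
  | succ d ih => simp [List.range_succ] at ih ⊢; omega

lemma block_len (c : Int) (d : Nat) : (block c d).length = 3 * d :=
  flatMap_rep3_len d _

lemma setv3 (p : Nat) (hp : 3 ≤ p) (v : String) :
    (((List.replicate p (".":String)).set 0 v).set 1 v).set 2 v
      = v :: v :: v :: List.replicate (p - 3) "." := by
  obtain ⟨q, rfl⟩ : ∃ q, p = q + 3 := ⟨p - 3, by omega⟩
  simp [List.replicate_succ]

-- characterisation of A's full inner loop on a fresh dot row
lemma rowChar (z c : Int) (X : Nat) (hc : 0 ≤ c) (hcz : c ≤ max z 0) :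
    ∀ (m : Nat), 3 * m ≤ X →
    (List.range m).foldl (fun st (s : Nat) => rowStep z st (3 * (s : Int))) (List.replicate X ".", c)
    = (block c (min m (max z 0 - c).toNat) ++
        List.replicate (X - 3 * (min m (max z 0 - c).toNat)) ".",
       c + min m (max z 0 - c).toNat) := by
  intro m
  induction m with
  | zero => intro _; simp [block]
  | succ m ih =>
    intro hm3
    rw [List.range_succ, List.foldl_append, ih (by omega)]
    simp only [List.foldl_cons, List.foldl_nil, rowStep]
    set e := (max z 0 - c).toNat with he
    by_cases hlt : m < e
    · have hmin : min m e = m := by omega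
      have hmin' : min (m + 1) e = m + 1 := by omega
      rw [hmin, hmin']
      rw [if_pos (by omega : c + (m : Int) < z)]
      have hidx0 : ((3 : Int) * (m : Int)).toNat = 3 * m := by omega
      have hidx1 : ((3 : Int) * (m : Int) + 1).toNat = 3 * m + 1 := by omega
      have hidx2 : ((3 : Int) * (m : Int) + 2).toNat = 3 * m + 2 := by omega
      rw [hidx0, hidx1, hidx2]
      have hbl := block_len c m
      have hset : ∀ (k : Nat) (r : List String) (v : String),
          (block c m ++ r).set (3 * m + k) v = block c m ++ r.set k v := by
        intro k r v
        rw [List.set_append, if_neg (by omega), hbl]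
        congr 2
        omega
      have h0 : ∀ (r : List String) (v : String),
          (block c m ++ r).set (3 * m) v = block c m ++ r.set 0 v := fun r v => hset 0 r v
      rw [h0, hset 1, hset 2, setv3 (X - 3 * m) (by omega)]
      have hblock : block c (m + 1)
          = block c m ++ List.replicate 3 (PySem.Int.toStr (c + (m : Int) + 1)) := by
        simp [block, List.range_succ]
      rw [Prod.mk.injEq]
      constructor
      · rw [hblock, List.append_assoc]
        congr 1
      · push_cast; ring
    · have hmin : min m e = e := by omega
      have hmin' : min (m + 1) e = e := by omega
      rw [hmin, hmin', if_neg (by omega : ¬ (c + (e : Int) < z))]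

-- counter value of A after n full rows, and desks written in row n
def cnt (z t : Int) (n : Nat) : Int := min ((n : Int) * t) (max z 0)
def dks (z t : Int) (n : Nat) : Nat := min t.toNat (max z 0 - cnt z t n).toNat
def rowC (z t : Int) (X : Nat) (n : Nat) : List String :=
  block (cnt z t n) (dks z t n) ++ List.replicate (X - 3 * dks z t n) "."

lemma cnt_succ (z t : Int) (ht : 0 ≤ t) (n : Nat) :
    cnt z t (n + 1) = cnt z t n + (dks z t n : Int) := by
  simp only [cnt, dks]
  push_cast
  rw [show ((n : Int) + 1) * t = (n : Int) * t + t from by ring]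
  have ha : 0 ≤ (n : Int) * t := by positivity
  generalize (n : Int) * t = a at *
  omega

lemma set_map_range {α : Type} (N n : Nat) (f : Nat → α) (r : α) :
    ((List.range N).map f).set n r
      = (List.range N).map (fun i => if i = n then r else f i) := by
  apply List.ext_getElem (by simp)
  intro i h1 h2
  simp only [List.getElem_set, List.getElem_map, List.getElem_range]
  by_cases hin : n = i
  · subst hin; simp
  · rw [if_neg hin, if_neg (fun hh => hin hh.symm)]

-- the outer loop of A: after n rows the first n rows are done, the rest untouched
lemma mainFold (x z : Int) (N : Nat) :
    ∀ (n : Nat), n ≤ N →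
    (List.range n).foldl
      (fun (st : List (List String) × Int) (k : Nat) =>
        (PySem.List.pyRange 0 (x - 2) 3).foldl
          (fun st j => if st.2 < z then
              (pdSet2 (pdSet2 (pdSet2 st.1 k j.toNat (PySem.Int.toStr (st.2 + 1))) k (j + 1).toNat
                (PySem.Int.toStr (st.2 + 1))) k (j + 2).toNat (PySem.Int.toStr (st.2 + 1)), st.2 + 1)
            else st) st)
      ((List.range N).map (fun _ => List.replicate x.toNat (".":String)), 0)
    = ((List.range N).map (fun i =>
         if i < n then rowC z (Tn x) x.toNat i else List.replicate x.toNat "."),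
       cnt z (Tn x) n) := by
  intro n
  induction n with
  | zero =>
    intro _
    simp [cnt]
  | succ n ih =>
    intro hn
    rw [List.range_succ, List.foldl_append, ih (by omega)]
    simp only [List.foldl_cons, List.foldl_nil]
    have hlen : n < ((List.range N).map (fun i =>
        if i < n then rowC z (Tn x) x.toNat i else List.replicate x.toNat (".":String))).length := by
      simp; omega
    rw [lift z n _ _ _ hlen]
    have hget : ((List.range N).map (fun i =>
        if i < n then rowC z (Tn x) x.toNat i else List.replicate x.toNat (".":String)))[n]'hlen
        = List.replicate x.toNat "." := by
      simp
    rw [hget, hJ x, List.foldl_map]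
    have hX : 3 * Tn x ≤ x.toNat := by
      have := hT3 x; omega
    have hc0 : (0:Int) ≤ cnt z (Tn x) n := by
      unfold cnt; positivity
    have hcz : cnt z (Tn x) n ≤ max z 0 := by
      unfold cnt; omega
    rw [rowChar z (cnt z (Tn x) n) x.toNat hc0 hcz (Tn x) hX]
    rw [Prod.mk.injEq]
    constructor
    · rw [set_map_range]
      apply List.map_congr_left
      intro i hi
      by_cases hin : i = n
      · subst hin
        simp only [if_pos (by omega : i < i + 1)]
        unfold rowC dks
        congr 2
      · rw [if_neg hin]
        by_cases hlt : i < n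
        · rw [if_pos hlt, if_pos (by omega)]
        · rw [if_neg hlt, if_neg (by omega)]
    · rw [cnt_succ z (Tn x) (by positivity) n]
      unfold dks
      congr 2

-- B's row i equals rowC
lemma rowB_eq (x z : Int) (i : Nat) :
    (let t : Int := ((PySem.List.pyRange 0 (x - 2) 3).length : Int)
     let hi := min z (((i : Int) + 1) * t)
     let cells := (PySem.List.pyRange ((i : Int) * t + 1) (hi + 1) 1).foldl
       (fun acc k => acc ++ PySem.List.pyRepeat [PySem.Int.toStr k] 3) []
     cells ++ PySem.List.pyRepeat ["."] (x - (cells.length : Int)))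
    = rowC z (Tn x) x.toNat i := by
  show (PySem.List.pyRange ((i : Int) * (Tn x : Int) + 1)
          (min z (((i : Int) + 1) * (Tn x : Int)) + 1) 1).foldl
        (fun acc k => acc ++ PySem.List.pyRepeat [PySem.Int.toStr k] 3) [] ++
      PySem.List.pyRepeat ["."]
        (x - ((((PySem.List.pyRange ((i : Int) * (Tn x : Int) + 1)
          (min z (((i : Int) + 1) * (Tn x : Int)) + 1) 1).foldl
        (fun acc k => acc ++ PySem.List.pyRepeat [PySem.Int.toStr k] 3) []).length : Int)))
    = rowC z (Tn x) x.toNat i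
  have ht : (0:Int) ≤ (Tn x : Int) := by positivity
  have ha : (0:Int) ≤ (i : Int) * (Tn x : Int) := by positivity
  simp only [rowC, cnt, dks, block]
  rw [Int.toNat_natCast]
  rw [show ((i : Int) + 1) * (Tn x : Int) = (i : Int) * (Tn x : Int) + (Tn x : Int) from by ring]
  generalize hA : (i : Int) * (Tn x : Int) = a at ha ⊢
  have hcells : (PySem.List.pyRange (a + 1) (min z (a + (Tn x : Int)) + 1) 1).foldl
        (fun acc k => acc ++ PySem.List.pyRepeat [PySem.Int.toStr k] 3) []
      = (List.range ((min z (a + (Tn x : Int)) - a).toNat)).flatMap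
          (fun (k : Nat) => List.replicate 3 (PySem.Int.toStr (a + 1 + (k : Int)))) := by
    rw [PySem.List.foldl_append_eq_flatMap, List.nil_append,
        PySem.List.pyRange_of_pos _ _ (by norm_num : (0:Int) < 1), List.flatMap_map]
    have hcount : (if a + 1 < min z (a + (Tn x : Int)) + 1
          then ((min z (a + (Tn x : Int)) + 1 - (a + 1) + 1 - 1) / 1).toNat else 0)
        = (min z (a + (Tn x : Int)) - a).toNat := by
      simp only [Int.ediv_one]; split_ifs <;> omega
    rw [hcount]
    congr 1
    funext k
    rw [PySem.List.pyRepeat_singleton, show ((3:Int)).toNat = 3 from rfl]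
    norm_num
  rw [hcells, flatMap_rep3_len, PySem.List.pyRepeat_singleton]
  set D := (min z (a + (Tn x : Int)) - a).toNat with hDdef
  by_cases hz : max z 0 ≤ a
  · rw [show D = 0 from by omega,
        show min (Tn x) ((max z 0 - min a (max z 0)).toNat) = 0 from by omega]
    simp only [List.range_zero, List.flatMap_nil, List.nil_append, Nat.mul_zero, Nat.sub_zero]
    congr 1
    omega
  · rw [show min a (max z 0) = a from by omega,
        show min (Tn x) ((max z 0 - a).toNat) = D from by omega]
    congr 1
    · congr 1
      funext k
      congr 2
      ring
    · congr 1
      omega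

-- ===== VERDICT (by name: the statement is the Claim_ definition above) =====
theorem place_desks_spec : Claim_equal_place_desks := by
  unfold Claim_equal_place_desks Spec_place_desks
  intro x y z _
  unfold place_desks place_desks_alt
  rw [pyR1 y]
  -- the dot row
  have hdot : (PySem.List.pyRange 0 x 1).map (fun _ => (".":String))
      = List.replicate x.toNat "." := by
    rw [pyR1 x, List.map_map]
    exact List.eq_replicate_iff.mpr ⟨by simp, by simp⟩
  rw [hdot]
  -- A side: remove the let, push the fold through the Nat range
  simp only [List.foldl_map, List.map_map, Function.comp_def, Int.toNat_natCast]
  rw [mainFold x z y.toNat y.toNat le_rfl]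
  apply List.map_congr_left
  intro i hi
  rw [if_pos (List.mem_range.mp hi)]
  exact (rowB_eq x z i).symm
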